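-- pv_equiv track=rewrite | github.com/himu0023/DSA | Advance Recursion/sumseq.py | func
-- ===== SOURCE A (Python) =====
-- def func(nums):
--   n = len(nums)
--   total_subset = 1<<n
--   result = []
--
--   for num in range(total_subset):
--     subset_sum =0
--     for i in range(n):
--       if num & (1<<i):
--         subset_sum  += nums[i]
--     result.append(subset_sum)
--   return result
-- ===== SOURCE B (Python) =====
-- def func(nums):
--   result = [0]
--   for x in nums:
--     result = result + [s + x for s in result]
--   return result
-- ===== Notes on version B (the rewrite author's own statement) =====
-- stated objective: alternative
-- what changed: Replaces the per-mask inner bit-scan over all n positions by a doubling DP: the result list for k+1 elements is the list for k elements followed by that list shifted by the new element, so each subset sum costs O(1) instead of O(n); a timing run read B 19x at n=16 but both time out at n=64 (the output itself is exponential), so no speed claim is made.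
import Mathlib
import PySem

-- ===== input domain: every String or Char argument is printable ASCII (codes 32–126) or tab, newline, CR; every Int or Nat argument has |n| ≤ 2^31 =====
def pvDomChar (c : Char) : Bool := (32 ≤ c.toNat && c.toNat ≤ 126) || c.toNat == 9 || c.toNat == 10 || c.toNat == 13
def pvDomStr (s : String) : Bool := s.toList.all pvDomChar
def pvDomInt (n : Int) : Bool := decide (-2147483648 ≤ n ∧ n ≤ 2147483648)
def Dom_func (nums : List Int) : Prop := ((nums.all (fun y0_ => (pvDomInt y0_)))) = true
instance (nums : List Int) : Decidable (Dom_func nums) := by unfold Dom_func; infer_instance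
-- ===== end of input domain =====

-- B replaces A's per-mask bit-scan by a doubling DP (result for k+1 elements = result for k
-- elements ++ that list shifted by the new element), dropping the inner bit loop: objective = alternative.

-- ===== PORT A =====
-- literal port: for each num in range(1<<n), scan all bit positions i and add nums[i] when set.
-- nums[i] is always in range (0 ≤ i < n), so pyGetD's default 0 is never used.
def func (nums : List Int) : List Int :=
  (PySem.List.pyRange 0 ((1 : Int) <<< nums.length) 1).foldl (fun result num =>
    result ++ [(PySem.List.pyRange 0 (nums.length : Int) 1).foldl (fun subset_sum i =>
      if Int.land num ((1 : Int) <<< i.toNat) ≠ 0 then subset_sum + PySem.List.pyGetD nums i 0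
      else subset_sum) 0]) []

-- ===== PORT B =====
def func_alt (nums : List Int) : List Int :=
  nums.foldl (fun result x => result ++ result.map (fun s => s + x)) [0]

-- ===== PRECONDITION & SPEC =====
def Spec_func (nums : List Int) (out : List Int) : Prop := out = func_alt nums
instance (nums : List Int) (out : List Int) : Decidable (Spec_func nums out) := by unfold Spec_func; infer_instance

-- ===== CLAIM (what is proved, stated in full; the proofs are below) =====
def Claim_equal_func : Prop := ∀ (nums : List Int), Dom_func nums → Spec_func nums (func nums)

-- ===== LEMMAS AND PROOFS =====

-- the sum A computes for mask m, phrased over Nat masks and bit tests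
def pvInner (nums : List Int) (m : Nat) : Int :=
  (List.range nums.length).foldl (fun s k => if m.testBit k then s + nums.getD k 0 else s) 0

def pvA (nums : List Int) : List Int := (List.range (2 ^ nums.length)).map (pvInner nums)

theorem pv_land_test (m k : Nat) :
    (Int.land (m : Int) ((1 : Int) <<< (k : Int)) ≠ 0) ↔ m.testBit k = true := by
  have h1 : ((1 : Int) <<< (k : Int)) = ((2 ^ k : Nat) : Int) := by
    have := Int.shiftLeft_natCast 1 k
    simpa [Nat.shiftLeft_eq] using this
  have h2 : Int.land (m : Int) ((2 ^ k : Nat) : Int) = ((m &&& 2 ^ k : Nat) : Int) := rfl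
  rw [h1, h2, Nat.and_two_pow]
  rcases m.testBit k <;> simp

theorem pv_func_eq_pvA (nums : List Int) : func nums = pvA nums := by
  unfold func pvA
  have hshift : ((1 : Int) <<< nums.length) = ((2 ^ nums.length : Nat) : Int) := by
    rw [Int.shiftLeft_eq]; push_cast; ring
  rw [hshift, PySem.List.pyRange_zero_nat, PySem.List.pyRange_zero_nat, List.foldl_map,
      PySem.List.foldl_append_singleton_eq_map, List.nil_append]
  apply List.map_congr_left
  intro m _
  unfold pvInner
  rw [List.foldl_map]
  apply PySem.List.foldl_congr_mem
  intro acc k _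
  simp [pv_land_test]

theorem pv_pvA_nil : pvA [] = [0] := by decide

theorem pv_pvA_concat (ys : List Int) (x : Int) :
    pvA (ys ++ [x]) = pvA ys ++ (pvA ys).map (fun s => s + x) := by
  unfold pvA
  have hn : (ys ++ [x]).length = ys.length + 1 := by simp
  rw [hn, pow_succ, Nat.mul_two, List.range_add, List.map_append, List.map_map, List.map_map]
  congr 1
  · -- first half: masks m < 2^n ignore bit n
    apply List.map_congr_left
    intro m hm
    rw [List.mem_range] at hm
    unfold pvInner
    rw [hn, List.range_succ, List.foldl_append]
    simp only [List.foldl_cons, List.foldl_nil]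
    rw [Nat.testBit_lt_two_pow hm]
    simp only [if_neg Bool.false_ne_true]
    apply PySem.List.foldl_congr_mem
    intro acc k hk
    rw [List.mem_range] at hk
    rw [List.getD_append _ _ _ _ hk]
  · -- second half: mask 2^n + m has bit n set and the low bits of m
    apply List.map_congr_left
    intro m hm
    rw [List.mem_range] at hm
    show pvInner (ys ++ [x]) (2 ^ ys.length + m) = pvInner ys m + x
    unfold pvInner
    rw [hn, List.range_succ, List.foldl_append]
    simp only [List.foldl_cons, List.foldl_nil]
    rw [Nat.testBit_two_pow_add_eq, Nat.testBit_lt_two_pow hm]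
    simp only [Bool.not_false, if_true]
    have hx : (ys ++ [x]).getD ys.length 0 = x := by
      rw [List.getD_append_right _ _ _ _ (le_refl _)]; simp
    rw [hx]
    congr 1
    apply PySem.List.foldl_congr_mem
    intro acc k hk
    rw [List.mem_range] at hk
    rw [Nat.testBit_two_pow_add_gt hk, List.getD_append _ _ _ _ hk]

theorem pv_alt_concat (ys : List Int) (x : Int) :
    func_alt (ys ++ [x]) = func_alt ys ++ (func_alt ys).map (fun s => s + x) := by
  unfold func_alt
  rw [List.foldl_append]
  rfl

theorem pv_pvA_eq_alt (nums : List Int) : pvA nums = func_alt nums := by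
  induction nums using List.reverseRecOn with
  | nil => rw [pv_pvA_nil]; rfl
  | append_singleton ys x ih => rw [pv_pvA_concat, pv_alt_concat, ih]

-- ===== VERDICT (by name: the statement is the Claim_ definition above) =====
theorem func_spec : Claim_equal_func := by
  intro nums _
  unfold Spec_func
  rw [pv_func_eq_pvA, pv_pvA_eq_alt]
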